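-- pv_equiv track=rewrite | github.com/miliar/Code_Jam_Webscraper | solutions_python/Problem_155/766.py | solution
-- ===== SOURCE A (Python) =====
-- def solution(l):
-- 	cost = 0
-- 	people = l[0]
-- 	for i in range(1,len(l)):
-- 		if people < i:
-- 			cost += i - people
-- 			people += i - people
-- 		people += l[i]
-- 	return cost
-- ===== SOURCE B (Python) =====
-- def solution(l):
--     prefixes = []
--     total = 0
--     for x in l[:-1]:
--         total += x
--         prefixes.append(total)
--     deficits = [i + 1 - p for i, p in enumerate(prefixes)]
--     return max([0] + deficits)
-- ===== Notes on version B (the rewrite author's own statement) =====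
-- stated objective: alternative
-- what changed: B replaces A's single feedback loop (a people counter into which the accrued cost is folded back) by staged passes: build the prefix-sum list of l[:-1], map it to the deficit list i+1 - prefix_i, and return the maximum of that list together with 0.
-- outside the precondition, e.g. on solution([]): A raises IndexError, B returns 0
import Mathlib
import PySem

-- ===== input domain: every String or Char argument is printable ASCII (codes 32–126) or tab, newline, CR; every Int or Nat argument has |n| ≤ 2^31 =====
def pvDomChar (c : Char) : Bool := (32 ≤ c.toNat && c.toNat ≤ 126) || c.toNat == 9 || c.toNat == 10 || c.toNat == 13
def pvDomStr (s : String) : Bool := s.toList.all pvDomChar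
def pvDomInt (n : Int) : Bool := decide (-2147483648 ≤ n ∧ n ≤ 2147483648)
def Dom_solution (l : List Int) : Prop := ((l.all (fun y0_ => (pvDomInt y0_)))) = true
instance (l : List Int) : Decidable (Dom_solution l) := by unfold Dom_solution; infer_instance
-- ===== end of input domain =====

-- B replaces A's single feedback-adjusted loop by staged passes: build the prefix-sum
-- list of l[:-1], map it to its deficits i+1 - prefix, and return their max with 0
-- (alternative decomposition; same O(n) cost).


-- ===== PORT A =====
-- Reading the first element raises IndexError on the empty list: excluded by Pre_solution; .getD 0 is unreachable inside Pre_.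
def solution (l : List Int) : Int :=
  ((PySem.List.pyRange 1 (l.length : Int) 1).foldl
    (fun (s : Int × Int) i =>
      let s1 : Int × Int := if s.2 < i then (s.1 + (i - s.2), s.2 + (i - s.2)) else s
      (s1.1, s1.2 + PySem.List.pyGetD l i 0))
    (0, (PySem.List.pyGet? l 0).getD 0)).1

-- ===== PORT B =====
def solution_alt (l : List Int) : Int :=
  let pre := ((PySem.List.slice l none (some (-1))).foldl
      (fun (s : Int × List Int) x => (s.1 + x, s.2 ++ [s.1 + x])) (0, [])).2
  let deficits := (PySem.List.enumerate pre 0).map (fun p => p.1 + 1 - p.2)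
  (PySem.List.max? ((0 : Int) :: deficits) (fun y => y)).getD 0

-- ===== PRECONDITION & SPEC =====
-- Pre_ excludes only the empty list, on which A raises IndexError reading the first element.
def Pre_solution (l : List Int) : Prop := l ≠ []
instance (l : List Int) : Decidable (Pre_solution l) := by unfold Pre_solution; infer_instance
def pvWitness_solution : List Int := [1, 0, 3]

def Spec_solution (l : List Int) (out : Int) : Prop := out = solution_alt l
instance (l : List Int) (out : Int) : Decidable (Spec_solution l out) := by unfold Spec_solution; infer_instance

-- ===== CLAIM (what is proved, stated in full; the proofs are below) =====
def Claim_equal_solution : Prop := ∀ (l : List Int), Dom_solution l → Pre_solution l → Spec_solution l (solution l)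

-- ===== LEMMAS AND PROOFS =====

-- Reference recursion: indexed deficit maximum (j = current 1-based index, r = current prefix sum).
def hdef : List Int → Int → Int → Int → Int
  | [], _, c, _ => c
  | e :: es, j, c, r => hdef es (j + 1) (max c (j - r)) (r + e)

-- Prefix-sum scan from a running total.
def scanS : Int → List Int → List Int
  | _, [] => []
  | t, d :: ds => (t + d) :: scanS (t + d) ds

-- A's people counter equals the raw prefix sum plus the accrued cost: A's fold = max-of-deficits fold.
lemma pv_key (f : Int → Int) (is : List Int) : ∀ c r : Int,
    (is.foldl
      (fun (s : Int × Int) i =>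
        let s1 : Int × Int := if s.2 < i then (s.1 + (i - s.2), s.2 + (i - s.2)) else s
        (s1.1, s1.2 + f i))
      (c, r + c)).1
    = (is.foldl (fun (s : Int × Int) i => (max s.1 (i - s.2), s.2 + f i)) (c, r)).1 := by
  induction is with
  | nil => intro c r; rfl
  | cons i is ih =>
    intro c r
    simp only [List.foldl_cons]
    by_cases h : r + c < i
    · have h1 : max c (i - r) = i - r := by omega
      have h2 : (if r + c < i then (c + (i - (r + c)), r + c + (i - (r + c))) else (c, r + c)) = (i - r, i) := by
        rw [if_pos h]; simp only [Prod.mk.injEq]; omega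
      simp only [h2, h1]
      have := ih (i - r) (r + f i)
      have e : r + f i + (i - r) = i + f i := by ring
      rw [e] at this
      exact this
    · have h1 : max c (i - r) = c := by omega
      have h2 : (if r + c < i then (c + (i - (r + c)), r + c + (i - (r + c))) else (c, r + c)) = (c, r + c) := by
        rw [if_neg h]
      simp only [h2, h1]
      have := ih c (r + f i)
      have e : r + f i + c = r + c + f i := by ring
      rw [e] at this
      exact this

-- The max-of-deficits fold over enumerate IS hdef.
lemma enum_fold_eq_hdef (xs : List Int) : ∀ j c r : Int,
    ((PySem.List.enumerate xs j).foldl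
      (fun (s : Int × Int) p => (max s.1 (p.1 - s.2), s.2 + p.2)) (c, r)).1
    = hdef xs j c r := by
  induction xs with
  | nil => intro j c r; rfl
  | cons e es ih =>
    intro j c r
    rw [PySem.List.enumerate_cons]
    simpa [hdef] using ih (j + 1) (max c (j - r)) (r + e)

-- B's list-building fold produces the prefix-sum scan.
lemma pre_fold_eq_scanS (ds : List Int) : ∀ (t : Int) (acc : List Int),
    (ds.foldl (fun (s : Int × List Int) x => (s.1 + x, s.2 ++ [s.1 + x])) (t, acc)).2
    = acc ++ scanS t ds := by
  induction ds with
  | nil => intro t acc; simp [scanS]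
  | cons d ds ih =>
    intro t acc
    simp only [List.foldl_cons, scanS]
    rw [ih (t + d) (acc ++ [t + d])]
    simp

lemma scanS_dropLast (ds : List Int) : ∀ t : Int, scanS t ds.dropLast = (scanS t ds).dropLast := by
  induction ds with
  | nil => intro t; rfl
  | cons d ds ih =>
    intro t
    cases ds with
    | nil => rfl
    | cons e es => simpa [scanS] using ih (t + d)

-- Index shift: deficits taken from enumerate … 0 with i+1 equal deficits from enumerate … 1.
lemma enum_shift (ys : List Int) : ∀ s : Int,
    (PySem.List.enumerate ys s).map (fun p => p.1 + 1 - p.2)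
    = (PySem.List.enumerate ys (s + 1)).map (fun p => p.1 - p.2) := by
  induction ys with
  | nil => intro s; rfl
  | cons y ys ih =>
    intro s
    rw [PySem.List.enumerate_cons, PySem.List.enumerate_cons]
    simp only [List.map_cons]
    rw [ih (s + 1)]

-- hdef equals the running max over the deficit list of the prefix scan.
lemma hdef_eq_foldl_max (xs : List Int) : ∀ j c r : Int,
    hdef xs j c r
    = ((PySem.List.enumerate ((r :: scanS r xs).dropLast) j).map (fun p => p.1 - p.2)).foldl max c := by
  induction xs with
  | nil => intro j c r; rfl
  | cons e es ih =>
    intro j c r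
    simp only [hdef, scanS]
    rw [ih (j + 1) (max c (j - r)) (r + e)]
    have hne : (r + e) :: scanS (r + e) es ≠ [] := by simp
    simp [List.dropLast_cons_of_ne_nil hne, PySem.List.enumerate_cons]

theorem solution_spec : Claim_equal_solution := by
  intro l _ hl
  simp only [Spec_solution, solution, solution_alt]
  obtain ⟨x, xs, rfl⟩ := List.exists_cons_of_ne_nil hl
  -- A side: remove the feedback, fold over enumerate, reach hdef
  rw [show ((0 : Int), (PySem.List.pyGet? (x :: xs) 0).getD 0) = (0, x + 0) from by simp [PySem.List.pyGet?, PySem.List.pyIdx?]]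
  rw [pv_key (fun i => PySem.List.pyGetD (x :: xs) i 0) _ 0 x]
  have hrange : (PySem.List.pyRange 1 ((x :: xs).length : Int) 1).map
      (fun j => (j, PySem.List.pyGetD (x :: xs) j 0)) = PySem.List.enumerate xs 1 := by
    have hpos : (0:Int) < ((x :: xs).length : Int) := by exact_mod_cast Nat.succ_pos xs.length
    have h0 := PySem.List.pyRange_one_cons hpos
    rw [zero_add] at h0
    have := (PySem.List.enumerate_eq_map_pyRange (d := 0) (xs := x :: xs)).symm
    simp only [PySem.List.len_eq] at this
    rw [h0, List.map_cons, PySem.List.enumerate_cons] at this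
    exact (List.cons.injEq _ _ _ _).mp this |>.2
  have hfold : (PySem.List.pyRange 1 ((x :: xs).length : Int) 1).foldl
      (fun (s : Int × Int) i => (max s.1 (i - s.2), s.2 + PySem.List.pyGetD (x :: xs) i 0)) (0, x)
      = (PySem.List.enumerate xs 1).foldl
      (fun (s : Int × Int) p => (max s.1 (p.1 - s.2), s.2 + p.2)) (0, x) := by
    rw [← hrange, List.foldl_map]
  rw [hfold, enum_fold_eq_hdef xs 1 0 x]
  -- B side
  rw [PySem.List.slice_to_neg_one]
  rw [pre_fold_eq_scanS _ 0 []]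
  rw [PySem.List.max?_id_cons, Option.getD_some]
  rw [enum_shift _ 0, show (0 : Int) + 1 = 1 from rfl]
  rw [hdef_eq_foldl_max xs 1 0 x]
  congr 2
  -- relate the scan of dropLast l to dropLast of (x :: scan x xs)
  cases xs with
  | nil => simp [scanS]
  | cons e es =>
    have hL : (x :: e :: es).dropLast = x :: (e :: es).dropLast :=
      List.dropLast_cons_of_ne_nil (by simp)
    have hR : (x :: scanS x (e :: es)).dropLast = x :: (scanS x (e :: es)).dropLast :=
      List.dropLast_cons_of_ne_nil (by simp [scanS])
    rw [hL, hR, ← scanS_dropLast]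
    simp [scanS]
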